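-- pv_equiv track=rewrite | github.com/kamlabo/tagoitsuki-uav_research | FindRoute.py | savehistory
-- ===== SOURCE A (Python) =====
-- def savehistory(cnt, target_x, target_y, save_x, save_y):
-- 	if(cnt==1):
-- 		return 1
-- 	else:
-- 		for a in range(cnt):
-- 			for b in range(cnt):
-- 				if(save_x[a]==target_x and save_y[b]==target_y):
-- 					return 0
-- 	return 1
-- ===== SOURCE B (Python) =====
-- # B: one membership test per list on the first-cnt slice, instead of A's nested index loops.
-- def savehistory(cnt, target_x, target_y, save_x, save_y):
--     if cnt == 1:
--         return 1
--     n = max(cnt, 0)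
--     if target_x in save_x[:n] and target_y in save_y[:n]:
--         return 0
--     return 1
-- ===== Notes on version B (the rewrite author's own statement) =====
-- stated objective: faster
-- what changed: Replaced the nested cnt*cnt index loops (which re-read save_x[a] on every inner step) by two slice-membership tests on the first cnt elements, returning 0 iff both targets occur there.
import Mathlib
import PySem

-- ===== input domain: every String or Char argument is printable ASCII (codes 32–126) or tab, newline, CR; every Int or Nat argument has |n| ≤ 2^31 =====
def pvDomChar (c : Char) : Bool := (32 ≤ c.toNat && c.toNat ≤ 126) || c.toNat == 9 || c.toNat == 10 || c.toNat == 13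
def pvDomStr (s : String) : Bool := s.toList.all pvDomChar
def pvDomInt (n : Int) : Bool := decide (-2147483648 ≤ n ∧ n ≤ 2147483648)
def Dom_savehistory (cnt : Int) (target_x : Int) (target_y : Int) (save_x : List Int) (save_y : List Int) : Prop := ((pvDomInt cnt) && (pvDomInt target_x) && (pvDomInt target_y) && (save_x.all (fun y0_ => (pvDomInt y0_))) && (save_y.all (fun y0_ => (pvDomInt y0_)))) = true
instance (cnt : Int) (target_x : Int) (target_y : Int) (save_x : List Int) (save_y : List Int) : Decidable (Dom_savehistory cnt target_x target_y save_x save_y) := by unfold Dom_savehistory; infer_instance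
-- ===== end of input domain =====

-- B replaces A's nested index loops by two slice-membership tests over the first cnt elements (objective: faster).
-- A's IndexError inputs are excluded by Pre_ (Option none in the A port marks the exception).

-- ===== PORT A =====
-- inner loop 'for b in range(cnt)'; result: none = IndexError, some (some 0) = 'return 0', some none = loop fell through
def savehistoryInner (target_x : Int) (target_y : Int) (a : Int) (save_x : List Int) (save_y : List Int) : List Int → Option (Option Int)
  | [] => some none
  | b :: bs =>
    match PySem.List.pyGet? save_x a with
    | none => none
    | some xa =>
      if xa = target_x then
        match PySem.List.pyGet? save_y b with
        | none => none
        | some yb =>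
          if yb = target_y then some (some 0)
          else savehistoryInner target_x target_y a save_x save_y bs
      else savehistoryInner target_x target_y a save_x save_y bs

-- outer loop 'for a in range(cnt)'; none = IndexError propagated
def savehistoryOuter (cnt : Int) (target_x : Int) (target_y : Int) (save_x : List Int) (save_y : List Int) : List Int → Option Int
  | [] => some 1
  | a :: as =>
    match savehistoryInner target_x target_y a save_x save_y (PySem.List.pyRange 0 cnt 1) with
    | none => none
    | some (some r) => some r
    | some none => savehistoryOuter cnt target_x target_y save_x save_y as

def savehistory (cnt : Int) (target_x : Int) (target_y : Int) (save_x : List Int) (save_y : List Int) : Int :=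
  if cnt = 1 then 1
  else ((savehistoryOuter cnt target_x target_y save_x save_y (PySem.List.pyRange 0 cnt 1)).getD 0)
  -- getD default is never reached under Pre_ (none = IndexError is excluded there)

-- ===== PORT B =====
def savehistory_alt (cnt : Int) (target_x : Int) (target_y : Int) (save_x : List Int) (save_y : List Int) : Int :=
  if cnt = 1 then 1
  else
    let n := max cnt 0
    if target_x ∈ PySem.List.slice save_x none (some n) ∧ target_y ∈ PySem.List.slice save_y none (some n) then 0
    else 1

-- ===== PRECONDITION & SPEC =====
-- Pre_ is exactly the set of inputs on which the Python A returns (it raises IndexError on the rest):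
-- A returns immediately for cnt = 1 or cnt ≤ 0; otherwise it returns 0 when both targets occur among
-- the first cnt saved coordinates, and returns 1 when the scan stays in range (cnt ≤ len save_x and,
-- if an x-match is reached, cnt ≤ len save_y).
def Pre_savehistory (cnt : Int) (target_x : Int) (target_y : Int) (save_x : List Int) (save_y : List Int) : Prop :=
  cnt = 1 ∨ cnt ≤ 0 ∨
  (target_x ∈ save_x.take cnt.toNat ∧ target_y ∈ save_y.take cnt.toNat) ∨
  (cnt ≤ (save_x.length : Int) ∧ (target_x ∉ save_x.take cnt.toNat ∨ cnt ≤ (save_y.length : Int)))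
instance (cnt : Int) (target_x : Int) (target_y : Int) (save_x : List Int) (save_y : List Int) : Decidable (Pre_savehistory cnt target_x target_y save_x save_y) := by unfold Pre_savehistory; infer_instance
def pvWitness_savehistory : Int × Int × Int × List Int × List Int := (2, 5, 7, [5, 1], [7, 1])

def Spec_savehistory (cnt : Int) (target_x : Int) (target_y : Int) (save_x : List Int) (save_y : List Int) (out : Int) : Prop := out = savehistory_alt cnt target_x target_y save_x save_y
instance (cnt : Int) (target_x : Int) (target_y : Int) (save_x : List Int) (save_y : List Int) (out : Int) : Decidable (Spec_savehistory cnt target_x target_y save_x save_y out) := by unfold Spec_savehistory; infer_instance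

-- ===== CLAIM (what is proved, stated in full; the proofs are below) =====
def Claim_equal_savehistory : Prop := ∀ (cnt : Int) (target_x : Int) (target_y : Int) (save_x : List Int) (save_y : List Int), Dom_savehistory cnt target_x target_y save_x save_y → Pre_savehistory cnt target_x target_y save_x save_y → Spec_savehistory cnt target_x target_y save_x save_y (savehistory cnt target_x target_y save_x save_y)
-- ===== LEMMAS AND PROOFS =====

lemma inner_spec (target_x target_y a : Int) (save_x save_y : List Int) (xa : Int)
    (hx : PySem.List.pyGet? save_x a = some xa) (m : Int) :
    ∀ s : Int, 0 ≤ s →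
    savehistoryInner target_x target_y a save_x save_y (PySem.List.pyRange s m 1) =
      if xa = target_x then
        (if target_y ∈ (save_y.drop s.toNat).take (m - s).toNat then some (some 0)
         else if m ≤ (save_y.length : Int) ∨ m ≤ s then some none
         else none)
      else some none := by
  intro s0 hs0
  obtain ⟨n, hn⟩ : ∃ n, (m - s0).toNat = n := ⟨_, rfl⟩
  induction n generalizing s0 with
  | zero =>
    have hms : m ≤ s0 := by omega
    rw [PySem.List.pyRange_one_eq_nil hms]
    have h0 : (m - s0).toNat = 0 := by omega
    simp [savehistoryInner, h0, hms]
  | succ n ih =>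
    have hsm : s0 < m := by omega
    rw [PySem.List.pyRange_one_cons hsm]
    simp only [savehistoryInner, hx]
    by_cases hxa : xa = target_x
    case neg =>
      rw [ih (s0 + 1) (by omega) (by omega)]
      simp [hxa]
    case pos =>
      subst hxa
      rw [PySem.List.pyGet?_of_nonneg (h := hs0)]
      simp only [if_true]
      by_cases hlen : s0.toNat < save_y.length
      case neg =>
        have hnil : List.drop s0.toNat save_y = [] := List.drop_eq_nil_of_le (by omega)
        rw [List.getElem?_eq_none (by omega), hnil]
        simp only [List.take_nil, List.not_mem_nil, if_false]
        rw [if_neg (by omega)]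
      case pos =>
        rw [List.getElem?_eq_getElem hlen]
        have hdrop : List.drop s0.toNat save_y = save_y[s0.toNat] :: List.drop (s0.toNat + 1) save_y :=
          (List.getElem_cons_drop hlen).symm
        have htn : (m - s0).toNat = n + 1 := by omega
        have hst : (s0 + 1).toNat = s0.toNat + 1 := by omega
        have hmn : (m - (s0 + 1)).toNat = n := by omega
        by_cases hy : save_y[s0.toNat] = target_y
        · simp [hy, hdrop, htn, List.take_succ_cons]
        · simp only [if_neg hy]
          rw [ih (s0 + 1) (by omega) (by omega)]
          simp only [if_true]
          have hmem : target_y ∈ List.take (m - s0).toNat (List.drop s0.toNat save_y) ↔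
              target_y ∈ List.take (m - (s0 + 1)).toNat (List.drop (s0 + 1).toNat save_y) := by
            rw [hdrop, htn, hst, hmn, List.take_succ_cons, List.mem_cons]
            constructor
            · rintro (h | h)
              · exact absurd h.symm hy
              · exact h
            · exact Or.inr
          by_cases hm : target_y ∈ List.take (m - (s0 + 1)).toNat (List.drop (s0 + 1).toNat save_y)
          · rw [if_pos hm, if_pos (hmem.mpr hm)]
          · rw [if_neg hm, if_neg (fun h => hm (hmem.mp h))]
            have hor : (m ≤ (save_y.length : Int) ∨ m ≤ s0 + 1) ↔
                (m ≤ (save_y.length : Int) ∨ m ≤ s0) := by omega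
            by_cases hc : m ≤ (save_y.length : Int) ∨ m ≤ s0 + 1
            · rw [if_pos hc, if_pos (hor.mp hc)]
            · rw [if_neg hc, if_neg (fun h => hc (hor.mpr h))]

def innerRes (cnt target_y : Int) (save_y : List Int) : Option (Option Int) :=
  if target_y ∈ save_y.take cnt.toNat then some (some 0)
  else if cnt ≤ (save_y.length : Int) ∨ cnt ≤ 0 then some none
  else none

lemma outer_spec (cnt target_x target_y : Int) (save_x save_y : List Int) :
    ∀ s : Int, 0 ≤ s →
    savehistoryOuter cnt target_x target_y save_x save_y (PySem.List.pyRange s cnt 1) =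
      if target_x ∈ (save_x.drop s.toNat).take (cnt - s).toNat then
        (match innerRes cnt target_y save_y with
         | some (some r) => some r
         | some none => if cnt ≤ (save_x.length : Int) ∨ cnt ≤ s then some 1 else none
         | none => none)
      else if cnt ≤ (save_x.length : Int) ∨ cnt ≤ s then some 1 else none := by
  intro s0 hs0
  obtain ⟨n, hn⟩ : ∃ n, (cnt - s0).toNat = n := ⟨_, rfl⟩
  induction n generalizing s0 with
  | zero =>
    have hms : cnt ≤ s0 := by omega
    rw [PySem.List.pyRange_one_eq_nil hms]
    have h0 : (cnt - s0).toNat = 0 := by omega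
    simp [savehistoryOuter, h0, hms]
  | succ n ih =>
    have hsm : s0 < cnt := by omega
    rw [PySem.List.pyRange_one_cons hsm]
    simp only [savehistoryOuter]
    have hcnt0 : (0 : Int) < cnt := by omega
    by_cases hlenx : s0.toNat < save_x.length
    case neg =>
      -- first read of save_x[s0] inside the inner loop raises
      have hnone : PySem.List.pyGet? save_x s0 = none := by
        rw [PySem.List.pyGet?_of_nonneg (h := hs0), List.getElem?_eq_none (by omega)]
      rw [PySem.List.pyRange_one_cons hcnt0]
      simp only [savehistoryInner, hnone]
      have hnil : List.drop s0.toNat save_x = [] := List.drop_eq_nil_of_le (by omega)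
      rw [hnil]
      simp only [List.take_nil, List.not_mem_nil, if_false]
      rw [if_neg (by omega)]
    case pos =>
      have hget : PySem.List.pyGet? save_x s0 = some save_x[s0.toNat] := by
        rw [PySem.List.pyGet?_of_nonneg (h := hs0), List.getElem?_eq_getElem hlenx]
      have hdrop : List.drop s0.toNat save_x = save_x[s0.toNat] :: List.drop (s0.toNat + 1) save_x :=
        (List.getElem_cons_drop hlenx).symm
      have htn : (cnt - s0).toNat = n + 1 := by omega
      have hst : (s0 + 1).toNat = s0.toNat + 1 := by omega
      have hmn : (cnt - (s0 + 1)).toNat = n := by omega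
      have hor : (cnt ≤ (save_x.length : Int) ∨ cnt ≤ s0 + 1) ↔
          (cnt ≤ (save_x.length : Int) ∨ cnt ≤ s0) := by omega
      by_cases hxa : save_x[s0.toNat] = target_x
      case pos =>
        have hin : savehistoryInner target_x target_y s0 save_x save_y (PySem.List.pyRange 0 cnt 1) =
            innerRes cnt target_y save_y := by
          rw [inner_spec target_x target_y s0 save_x save_y _ hget cnt 0 (le_refl 0)]
          simp [hxa, innerRes]
        rw [hin]
        have hmem : target_x ∈ List.take (cnt - s0).toNat (List.drop s0.toNat save_x) := by
          rw [hdrop, htn, List.take_succ_cons]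
          exact List.mem_cons.mpr (Or.inl hxa.symm)
        rw [if_pos hmem]
        rcases hIY : innerRes cnt target_y save_y with _ | _ | r
        · rfl
        · -- inner loop fell through: the outer loop continues
          rw [ih (s0 + 1) (by omega) (by omega), hIY]
          by_cases hm : target_x ∈ List.take (cnt - (s0 + 1)).toNat (List.drop (s0 + 1).toNat save_x)
          · rw [if_pos hm]
            by_cases hc : cnt ≤ (save_x.length : Int) ∨ cnt ≤ s0 + 1
            · rw [if_pos hc, if_pos (hor.mp hc)]
            · rw [if_neg hc, if_neg (fun h => hc (hor.mpr h))]
          · rw [if_neg hm]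
            by_cases hc : cnt ≤ (save_x.length : Int) ∨ cnt ≤ s0 + 1
            · rw [if_pos hc, if_pos (hor.mp hc)]
            · rw [if_neg hc, if_neg (fun h => hc (hor.mpr h))]
        · rfl
      case neg =>
        have hin : savehistoryInner target_x target_y s0 save_x save_y (PySem.List.pyRange 0 cnt 1) =
            some none := by
          rw [inner_spec target_x target_y s0 save_x save_y _ hget cnt 0 (le_refl 0)]
          simp [hxa]
        rw [hin, ih (s0 + 1) (by omega) (by omega)]
        have hmemIff : target_x ∈ List.take (cnt - s0).toNat (List.drop s0.toNat save_x) ↔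
            target_x ∈ List.take (cnt - (s0 + 1)).toNat (List.drop (s0 + 1).toNat save_x) := by
          rw [hdrop, htn, hst, hmn, List.take_succ_cons, List.mem_cons]
          constructor
          · rintro (h | h)
            · exact absurd h.symm hxa
            · exact h
          · exact Or.inr
        by_cases hm : target_x ∈ List.take (cnt - (s0 + 1)).toNat (List.drop (s0 + 1).toNat save_x)
        · rw [if_pos hm, if_pos (hmemIff.mpr hm)]
          rcases hIY : innerRes cnt target_y save_y with _ | _ | r
          · rfl
          · by_cases hc : cnt ≤ (save_x.length : Int) ∨ cnt ≤ s0 + 1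
            · rw [if_pos hc, if_pos (hor.mp hc)]
            · rw [if_neg hc, if_neg (fun h => hc (hor.mpr h))]
          · rfl
        · rw [if_neg hm, if_neg (fun h => hm (hmemIff.mp h))]
          by_cases hc : cnt ≤ (save_x.length : Int) ∨ cnt ≤ s0 + 1
          · rw [if_pos hc, if_pos (hor.mp hc)]
          · rw [if_neg hc, if_neg (fun h => hc (hor.mpr h))]

-- ===== VERDICT (by name: the statement is the Claim_ definition above) =====
theorem savehistory_spec : Claim_equal_savehistory := by
  intro cnt target_x target_y save_x save_y hdom hpre
  unfold Spec_savehistory savehistory savehistory_alt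
  by_cases h1 : cnt = 1
  · simp [h1]
  · rw [if_neg h1, if_neg h1]
    rw [outer_spec cnt target_x target_y save_x save_y 0 (le_refl 0)]
    have hmax : (0 : Int) ≤ max cnt 0 := le_max_right cnt 0
    have htn : (max cnt 0).toNat = cnt.toNat := by omega
    simp only [PySem.List.slice_to _ hmax, htn, Int.sub_zero, Int.toNat_zero, List.drop_zero]
    unfold Pre_savehistory at hpre
    by_cases hmx : target_x ∈ save_x.take cnt.toNat
    · by_cases hmy : target_y ∈ save_y.take cnt.toNat
      · have hxy : target_x ∈ save_x.take cnt.toNat ∧ target_y ∈ save_y.take cnt.toNat := ⟨hmx, hmy⟩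
        rw [if_pos hmx, if_pos hxy]
        simp [innerRes, hmy]
      · have hcond : (cnt ≤ (save_y.length : Int) ∨ cnt ≤ 0) ∧ (cnt ≤ (save_x.length : Int) ∨ cnt ≤ 0) := by
          rcases hpre with h | h | ⟨ha, hb⟩ | ⟨hl, h⟩
          · exact absurd h h1
          · exact ⟨Or.inr h, Or.inr h⟩
          · exact absurd hb hmy
          · rcases h with h' | h'
            · exact absurd hmx h'
            · exact ⟨Or.inl h', Or.inl hl⟩
        have hnand : ¬ (target_x ∈ save_x.take cnt.toNat ∧ target_y ∈ save_y.take cnt.toNat) :=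
          fun h => hmy h.2
        rw [if_pos hmx, if_neg hnand]
        have hc1 := hcond.1
        have hc2 := hcond.2
        simp [innerRes, hmy, hc1, hc2]
    · have hcond : cnt ≤ (save_x.length : Int) ∨ cnt ≤ 0 := by
        rcases hpre with h | h | ⟨ha, hb⟩ | ⟨hl, h⟩
        · exact absurd h h1
        · exact Or.inr h
        · exact absurd ha hmx
        · exact Or.inl hl
      have hnand : ¬ (target_x ∈ save_x.take cnt.toNat ∧ target_y ∈ save_y.take cnt.toNat) :=
        fun h => hmx h.1
      rw [if_neg hmx, if_pos hcond, if_neg hnand]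
      rfl
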